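-- pv_equiv track=rewrite | github.com/linhx13/leetcode-code | code/822-card-flipping-game.py | flipgame
-- ===== SOURCE A (Python) =====
-- from typing import List
--
-- def flipgame(fronts: List[int], backs: List[int]) -> int:
--     same = {x for i, x in enumerate(fronts) if x == backs[i]}
--     res = float("inf")
--     for x in fronts:
--         if x not in same:
--             res = min(res, x)
--     for x in backs:
--         if x not in same:
--             res = min(res, x)
--     return res if res < float("inf") else 0
-- ===== SOURCE B (Python) =====
-- def flipgame(fronts, backs):
--     same = {f for f, b in zip(fronts, backs) if f == b}
--     for x in sorted(fronts + backs):
--         if x not in same: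
--             return x
--     return 0
-- ===== Notes on version B (the rewrite author's own statement) =====
-- stated objective: simpler
-- what changed: Replaces the infinity-sentinel running-min over two separate loops by one sorted pass over fronts+backs that early-returns the first value not appearing on both sides of some card.
import Mathlib
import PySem

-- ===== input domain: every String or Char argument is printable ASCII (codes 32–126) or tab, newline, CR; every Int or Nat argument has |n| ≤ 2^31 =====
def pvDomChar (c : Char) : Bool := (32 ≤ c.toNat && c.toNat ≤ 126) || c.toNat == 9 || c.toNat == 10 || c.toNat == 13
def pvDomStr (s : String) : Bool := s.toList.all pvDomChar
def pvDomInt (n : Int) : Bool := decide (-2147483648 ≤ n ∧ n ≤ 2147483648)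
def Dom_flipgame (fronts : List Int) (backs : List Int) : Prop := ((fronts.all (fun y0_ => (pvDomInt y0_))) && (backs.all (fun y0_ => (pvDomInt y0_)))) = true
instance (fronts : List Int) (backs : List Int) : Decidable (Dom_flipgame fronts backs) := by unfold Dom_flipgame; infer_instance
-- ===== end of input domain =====

-- B replaces the infinity-sentinel double running-min loop by one sorted early-return pass (objective: simpler).


-- ===== PORT A =====
-- res = min(res, x) with res starting at float("inf"): modelled as Option Int (none = inf)
def pymin : Option Int → Int → Option Int
  | none, x => some x
  | some r, x => some (min r x)

-- same = {x for i, x in enumerate(fronts) if x == backs[i]}  (backs[i] via pyGet?; none = IndexError, outside Pre_)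
def pvSameA (fronts backs : List Int) : PySem.Set Int :=
  (PySem.List.enumerate fronts).foldl
    (fun s p => if PySem.List.pyGet? backs p.1 = some p.2 then PySem.Set.add s p.2 else s)
    PySem.Set.empty

def flipgame (fronts : List Int) (backs : List Int) : Int :=
  (backs.foldl (fun r x => if PySem.Set.contains (pvSameA fronts backs) x then r else pymin r x)
    (fronts.foldl (fun r x => if PySem.Set.contains (pvSameA fronts backs) x then r else pymin r x)
      (none : Option Int))).getD 0

-- ===== PORT B =====
-- same = {f for f, b in zip(fronts, backs) if f == b}
def pvSameB (fronts backs : List Int) : PySem.Set Int :=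
  PySem.Set.ofList (((fronts.zip backs).filter (fun p => p.1 = p.2)).map Prod.fst)

-- for x in sorted(fronts + backs): if x not in same: return x;  return 0
def flipgame_alt (fronts : List Int) (backs : List Int) : Int :=
  ((PySem.List.sorted (fronts ++ backs) (fun x => x) false).find?
    (fun x => !(PySem.Set.contains (pvSameB fronts backs) x))).getD 0

-- ===== PRECONDITION & SPEC =====
-- Pre_ excludes exactly the inputs where A raises IndexError at backs[i] (backs shorter than fronts).
def Pre_flipgame (fronts : List Int) (backs : List Int) : Prop := fronts.length ≤ backs.length
instance (fronts : List Int) (backs : List Int) : Decidable (Pre_flipgame fronts backs) := by unfold Pre_flipgame; infer_instance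
def pvWitness_flipgame : List Int × List Int := ([1, 2, 4], [1, 3, 4])

def Spec_flipgame (fronts : List Int) (backs : List Int) (out : Int) : Prop := out = flipgame_alt fronts backs
instance (fronts : List Int) (backs : List Int) (out : Int) : Decidable (Spec_flipgame fronts backs out) := by unfold Spec_flipgame; infer_instance

-- ===== CLAIM (what is proved, stated in full; the proofs are below) =====
def Claim_equal_flipgame : Prop := ∀ (fronts : List Int) (backs : List Int), Dom_flipgame fronts backs → Pre_flipgame fronts backs → Spec_flipgame fronts backs (flipgame fronts backs)

-- ===== LEMMAS AND PROOFS =====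

-- membership in A's conditional-add fold
theorem mem_foldl_addIf {l : List (Int × Int)} {acc : PySem.Set Int}
    (c : Int × Int → Prop) [DecidablePred c] (x : Int) :
    x ∈ l.foldl (fun s p => if c p then PySem.Set.add s p.2 else s) acc ↔
      x ∈ acc ∨ ∃ p ∈ l, c p ∧ p.2 = x := by
  induction l generalizing acc with
  | nil => simp
  | cons q t ih =>
    simp only [List.foldl_cons]
    by_cases hq : c q
    · rw [if_pos hq, ih]
      simp only [PySem.Set.mem_add, List.mem_cons]
      constructor
      · rintro ((h | h) | ⟨p, hp, hc, he⟩)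
        · exact Or.inl h
        · exact Or.inr ⟨q, Or.inl rfl, hq, h.symm⟩
        · exact Or.inr ⟨p, Or.inr hp, hc, he⟩
      · rintro (h | ⟨p, (rfl | hp), hc, he⟩)
        · exact Or.inl (Or.inl h)
        · exact Or.inl (Or.inr he.symm)
        · exact Or.inr ⟨p, hp, hc, he⟩
    · rw [if_neg hq, ih]
      simp only [List.mem_cons]
      constructor
      · rintro (h | ⟨p, hp, hc, he⟩)
        · exact Or.inl h
        · exact Or.inr ⟨p, Or.inr hp, hc, he⟩
      · rintro (h | ⟨p, (rfl | hp), hc, he⟩)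
        · exact Or.inl h
        · exact absurd hc hq
        · exact Or.inr ⟨p, hp, hc, he⟩

-- membership in zip by index
theorem mem_zip_iff_getElem' {α : Type} (l1 l2 : List α) (p : α × α) :
    p ∈ l1.zip l2 ↔ ∃ k, ∃ _ : k < min l1.length l2.length,
      l1[k]'(by omega) = p.1 ∧ l2[k]'(by omega) = p.2 := by
  rw [List.mem_iff_getElem]
  constructor
  · rintro ⟨k, hk, he⟩
    rw [List.length_zip] at hk
    refine ⟨k, hk, ?_, ?_⟩ <;>
      simp [← he, List.getElem_zip]
  · rintro ⟨k, hk, h1, h2⟩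
    refine ⟨k, by simp [List.length_zip]; omega, ?_⟩
    rw [List.getElem_zip]
    rw [Prod.ext_iff]
    exact ⟨h1, h2⟩

-- the two "same" sets have the same members under Pre_
theorem same_mem_iff (fronts backs : List Int) (h : fronts.length ≤ backs.length) (x : Int) :
    x ∈ pvSameA fronts backs ↔ x ∈ pvSameB fronts backs := by
  unfold pvSameA pvSameB
  rw [mem_foldl_addIf (fun p => PySem.List.pyGet? backs p.1 = some p.2)]
  simp only [PySem.Set.mem_ofList, List.mem_map, List.mem_filter, PySem.Set.empty,
    List.not_mem_nil, false_or]
  constructor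
  · rintro ⟨p, hp, hc, rfl⟩
    rw [PySem.List.mem_enumerate_iff] at hp
    obtain ⟨k, hk, rfl⟩ := hp
    simp only [zero_add] at hc ⊢
    rw [PySem.List.pyGet?_natCast] at hc
    have hkb : k < backs.length := lt_of_lt_of_le hk h
    rw [List.getElem?_eq_getElem hkb] at hc
    refine ⟨(fronts[k], backs[k]), ⟨?_, ?_⟩, rfl⟩
    · exact (mem_zip_iff_getElem' fronts backs _).mpr ⟨k, by omega, rfl, rfl⟩
    · simpa using (Option.some_injective _ hc).symm
  · rintro ⟨p, ⟨hp, hc⟩, rfl⟩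
    obtain ⟨k, hk, h1, h2⟩ := (mem_zip_iff_getElem' fronts backs p).mp hp
    simp only [decide_eq_true_eq] at hc
    refine ⟨((k : Int), p.1), ?_, ?_, rfl⟩
    · rw [PySem.List.mem_enumerate_iff]
      exact ⟨k, by omega, by simp [← h1]⟩
    · simp only [zero_add]
      rw [PySem.List.pyGet?_natCast, List.getElem?_eq_getElem (by omega)]
      rw [h2, ← hc]

-- A's conditional fold over a list = plain pymin fold over the filter
theorem foldl_pymin_filter (p : Int → Bool) (l : List Int) (r : Option Int) :
    l.foldl (fun r x => if p x then r else pymin r x) r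
      = (l.filter (fun x => !(p x))).foldl pymin r := by
  induction l generalizing r with
  | nil => rfl
  | cons a t ih =>
    cases h : p a <;> simp [h, ih, List.filter_cons]

theorem foldl_pymin_some (l : List Int) (a : Int) :
    l.foldl pymin (some a) = some (l.foldl min a) := by
  induction l generalizing a with
  | nil => rfl
  | cons b t ih => simp [pymin, ih]

-- find? on a list = head? of its filter
theorem find?_eq_head?_filter (p : Int → Bool) (l : List Int) :
    l.find? p = (l.filter p).head? := by
  induction l with
  | nil => rfl
  | cons a t ih =>
    cases h : p a
    · simpa [List.find?_cons, h, List.filter_cons] using ih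
    · simp [List.find?_cons, h, List.filter_cons]

-- the running min of a::u is a minimum of a::u
theorem foldl_min_spec (u : List Int) (a : Int) :
    u.foldl min a ∈ a :: u ∧ ∀ y ∈ a :: u, u.foldl min a ≤ y := by
  induction u generalizing a with
  | nil => simp
  | cons b t ih =>
    obtain ⟨h1, h2⟩ := ih (min a b)
    constructor
    · simp only [List.mem_cons]
      rcases List.mem_cons.mp h1 with h | h
      · rcases le_total a b with hab | hab
        · exact Or.inl (h.trans (min_eq_left hab))
        · exact Or.inr (Or.inl (h.trans (min_eq_right hab)))
      · exact Or.inr (Or.inr h)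
    · intro y hy
      rcases List.mem_cons.mp hy with rfl | hy'
      · exact le_trans (h2 _ (List.mem_cons_self ..)) (min_le_left _ _)
      · rcases List.mem_cons.mp hy' with rfl | hy''
        · exact le_trans (h2 _ (List.mem_cons_self ..)) (min_le_right _ _)
        · exact h2 _ (List.mem_cons_of_mem _ hy'')

theorem flipgame_spec : Claim_equal_flipgame := by
  unfold Claim_equal_flipgame
  intro fronts backs _ hpre
  unfold Spec_flipgame flipgame flipgame_alt
  have hmem : ∀ x, PySem.Set.contains (pvSameA fronts backs) x
      = PySem.Set.contains (pvSameB fronts backs) x := by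
    intro x
    rw [Bool.eq_iff_iff, PySem.Set.contains_iff, PySem.Set.contains_iff]
    exact same_mem_iff fronts backs hpre x
  simp only [hmem]
  rw [← List.foldl_append, foldl_pymin_filter, find?_eq_head?_filter]
  set p : Int → Bool := fun x => PySem.Set.contains (pvSameB fronts backs) x with hp
  set F : List Int := (fronts ++ backs).filter (fun x => !(p x)) with hF
  set s : List Int := PySem.List.sorted (fronts ++ backs) (fun x => x) false with hs
  have hperm : (s.filter (fun x => !(p x))).Perm F :=
    (PySem.List.sorted_perm (fronts ++ backs) (fun x => x) false).filter _
  have hpair : (s.filter (fun x => !(p x))).Pairwise (fun a b => a ≤ b) := by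
    have := PySem.List.sorted_pairwise (fronts ++ backs) (fun x => x)
    exact this.filter _
  rcases hG : s.filter (fun x => !(p x)) with _ | ⟨m, t⟩
  · rw [hG] at hperm
    have hFnil : F = [] := List.Perm.eq_nil hperm.symm
    rw [hFnil]
    rfl
  · rw [hG] at hperm hpair
    have hmF : m ∈ F := hperm.mem_iff.mp (List.mem_cons_self ..)
    have hle : ∀ y ∈ F, m ≤ y := by
      intro y hy
      rcases List.mem_cons.mp (hperm.mem_iff.mpr hy) with rfl | hy''
      · exact le_refl _
      · exact (List.pairwise_cons.mp hpair).1 y hy''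
    rcases hFe : F with _ | ⟨a, u⟩
    · rw [hFe] at hmF
      exact absurd hmF (List.not_mem_nil)
    · rw [hFe] at hmF hle
      rw [List.foldl_cons]
      show (u.foldl pymin (some a)).getD 0 = _
      rw [foldl_pymin_some]
      obtain ⟨hmem1, hmin1⟩ := foldl_min_spec u a
      have hmEq : u.foldl min a = m := le_antisymm (hmin1 m hmF) (hle _ hmem1)
      simp [hmEq]
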